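-- pv_equiv track=rewrite | github.com/AlexAgo83/cdx-logics-kit | logics-risk-reviewer/scripts/add_risk_sections.py | _insert_after_section
-- ===== SOURCE A (Python) =====
-- def _find_heading_index(lines: list[str], heading: str) -> int | None:
--     for i, line in enumerate(lines):
--         if line.strip() == heading:
--             return i
--     return None
--
-- def _insert_after_section(lines: list[str], heading: str, block: list[str]) -> list[str]:
--     index = _find_heading_index(lines, heading)
--     if index is None:
--         return lines + [""] + block
--
--     insert_at = index + 1
--     while insert_at < len(lines) and not lines[insert_at].startswith("# "):
--         insert_at += 1
--     return lines[:insert_at] + [""] + block + lines[insert_at:]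
-- ===== SOURCE B (Python) =====
-- def _insert_after_section(lines: list[str], heading: str, block: list[str]) -> list[str]:
--     out = []
--     found = False
--     inserted = False
--     for line in lines:
--         if not found and line.strip() == heading:
--             found = True
--             out.append(line)
--         elif found and not inserted and line.startswith("# "):
--             out.append("")
--             out.extend(block)
--             inserted = True
--             out.append(line)
--         else:
--             out.append(line)
--     if not inserted:
--         out.append("")
--         out.extend(block)
--     return out
-- ===== Notes on version B (the rewrite author's own statement) =====
-- stated objective: alternative
-- what changed: Replaces the index-search + while-scan + triple slice-splice with a single pass over the lines driven by found/inserted flags that builds the result list directly, with one post-loop append covering both the heading-absent and no-boundary cases.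
import Mathlib
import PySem

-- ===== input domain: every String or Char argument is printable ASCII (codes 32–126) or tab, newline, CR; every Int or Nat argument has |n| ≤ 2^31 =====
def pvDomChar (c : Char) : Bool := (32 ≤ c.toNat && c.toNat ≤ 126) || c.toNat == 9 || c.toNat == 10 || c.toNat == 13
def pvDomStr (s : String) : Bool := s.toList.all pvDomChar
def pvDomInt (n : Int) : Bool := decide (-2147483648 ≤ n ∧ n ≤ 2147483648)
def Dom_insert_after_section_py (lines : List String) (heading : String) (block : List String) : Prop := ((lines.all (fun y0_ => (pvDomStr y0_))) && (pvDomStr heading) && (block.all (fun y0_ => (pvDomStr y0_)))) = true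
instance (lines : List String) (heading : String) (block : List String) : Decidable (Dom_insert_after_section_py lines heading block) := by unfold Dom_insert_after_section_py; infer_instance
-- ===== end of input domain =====

-- B replaces A's index-search + while-scan + slice-splice with a single flag-driven pass
-- building the result list directly (objective: alternative; same asymptotic cost).


-- ===== PORT A =====
-- _find_heading_index: linear scan with a running index i
def findHeadingIndex : List String → String → Nat → Option Nat
  | [], _, _ => none
  | l :: rest, heading, i =>
      if PySem.Str.strip l == heading then some i else findHeadingIndex rest heading (i + 1)

-- the 'while insert_at < len(lines) and not lines[insert_at].startswith("# ")' loop
def advanceA (lines : List String) (i : Nat) : Nat :=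
  if h : i < lines.length ∧ ¬ (PySem.Str.startswith lines[i]! "# " = true) then
    advanceA lines (i + 1)
  else i
termination_by lines.length - i
decreasing_by omega

-- slices lines[:insert_at] / lines[insert_at:] with insert_at ≥ 0 are exactly take/drop
def insert_after_section_py (lines : List String) (heading : String) (block : List String) : List String :=
  match findHeadingIndex lines heading 0 with
  | none => lines ++ [""] ++ block
  | some index =>
      let insert_at := advanceA lines (index + 1)
      lines.take insert_at ++ [""] ++ block ++ lines.drop insert_at

-- ===== PORT B =====
-- single pass, state (found, inserted, out)
def stepB (heading : String) (block : List String)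
    (st : Bool × Bool × List String) (line : String) : Bool × Bool × List String :=
  match st with
  | (found, inserted, out) =>
    if !found && (PySem.Str.strip line == heading) then (true, inserted, out ++ [line])
    else if found && !inserted && PySem.Str.startswith line "# " then
      (true, true, out ++ [""] ++ block ++ [line])
    else (found, inserted, out ++ [line])

def insert_after_section_py_alt (lines : List String) (heading : String) (block : List String) : List String :=
  let s := lines.foldl (stepB heading block) (false, false, [])
  if !s.2.1 then s.2.2 ++ [""] ++ block else s.2.2

-- ===== PRECONDITION & SPEC =====
def Spec_insert_after_section_py (lines : List String) (heading : String) (block : List String) (out : List String) : Prop := out = insert_after_section_py_alt lines heading block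
instance (lines : List String) (heading : String) (block : List String) (out : List String) : Decidable (Spec_insert_after_section_py lines heading block out) := by unfold Spec_insert_after_section_py; infer_instance

-- ===== CLAIM (what is proved, stated in full; the proofs are below) =====
def Claim_equal_insert_after_section_py : Prop := ∀ (lines : List String) (heading : String) (block : List String), Dom_insert_after_section_py lines heading block → Spec_insert_after_section_py lines heading block (insert_after_section_py lines heading block)

-- ===== LEMMAS AND PROOFS =====

theorem hashToList : "# ".toList = ['#', ' '] := rfl

-- the boundary predicate: lines the while-loop keeps skipping
def notBdry (l : String) : Bool := !(PySem.Str.startswith l "# ")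

theorem advanceA_eq_drop (lines : List String) (i : Nat) :
    advanceA lines i = i + ((lines.drop i).takeWhile notBdry).length := by
  induction i using advanceA.induct lines with
  | case1 i h ih =>
      rw [advanceA, dif_pos h]
      have hlt : i < lines.length := h.1
      have hdrop : lines.drop i = lines[i] :: lines.drop (i + 1) :=
        List.drop_eq_getElem_cons hlt
      have hc := h.2
      rw [getElem!_pos lines i hlt] at hc
      simp only [Bool.not_eq_true] at hc
      simp only [PySem.Str.startswith_eq, hashToList] at hc
      have hp : notBdry lines[i] = true := by simp [notBdry, hc]
      rw [ih, hdrop, List.takeWhile_cons_of_pos hp]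
      simp; omega
  | case2 i h =>
      rw [advanceA, dif_neg h]
      rcases Decidable.em (i < lines.length) with hlt | hge
      · have hdrop : lines.drop i = lines[i] :: lines.drop (i + 1) :=
          List.drop_eq_getElem_cons hlt
        have hc : PySem.Str.startswith lines[i]! "# " = true := by
          by_contra hcc; exact h ⟨hlt, hcc⟩
        rw [getElem!_pos lines i hlt] at hc
        simp only [PySem.Str.startswith_eq, hashToList] at hc
        have hp : ¬ notBdry lines[i] = true := by simp [notBdry, hc]
        rw [hdrop, List.takeWhile_cons_of_neg hp]
        simp
      · rw [List.drop_eq_nil_of_le (by omega)]; simp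

theorem take_len_takeWhile {α : Type} (p : α → Bool) (xs : List α) :
    xs.take (xs.takeWhile p).length = xs.takeWhile p := by
  induction xs with
  | nil => simp
  | cons x xs ih =>
      by_cases h : p x
      · rw [List.takeWhile_cons_of_pos h]; simpa using ih
      · rw [List.takeWhile_cons_of_neg (by simp [h])]; simp

theorem drop_len_takeWhile {α : Type} (p : α → Bool) (xs : List α) :
    xs.drop (xs.takeWhile p).length = xs.dropWhile p := by
  induction xs with
  | nil => simp
  | cons x xs ih =>
      by_cases h : p x
      · rw [List.takeWhile_cons_of_pos h, List.dropWhile_cons_of_pos h]; simpa using ih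
      · rw [List.takeWhile_cons_of_neg (by simp [h]), List.dropWhile_cons_of_neg (by simp [h])]
        simp

theorem findHeadingIndex_shift (rest : List String) (heading : String) (i : Nat) :
    findHeadingIndex rest heading (i + 1) = (findHeadingIndex rest heading i).map (· + 1) := by
  induction rest generalizing i with
  | nil => rfl
  | cons l rs ih =>
      simp only [findHeadingIndex]
      by_cases h : PySem.Str.strip l == heading
      · simp [h]
      · simp only [h]; exact ih (i + 1)

-- A, characterised structurally
theorem A_found (l : String) (rest : List String) (heading : String) (block : List String)
    (h : (PySem.Str.strip l == heading) = true) :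
    insert_after_section_py (l :: rest) heading block =
      l :: (rest.takeWhile notBdry ++ [""] ++ block ++ rest.dropWhile notBdry) := by
  unfold insert_after_section_py
  rw [show findHeadingIndex (l :: rest) heading 0 = some 0 by
    simp [findHeadingIndex, h]]
  simp only
  rw [advanceA_eq_drop]
  have h1 : (l :: rest).drop (0 + 1) = rest := rfl
  rw [h1]
  have ht : (l :: rest).take (0 + 1 + (rest.takeWhile notBdry).length) =
      l :: rest.take (rest.takeWhile notBdry).length := by simp [Nat.add_comm]
  have hd : (l :: rest).drop (0 + 1 + (rest.takeWhile notBdry).length) =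
      rest.drop (rest.takeWhile notBdry).length := by simp [Nat.add_comm]
  rw [ht, hd, take_len_takeWhile, drop_len_takeWhile]
  simp

theorem A_notfound (l : String) (rest : List String) (heading : String) (block : List String)
    (h : (PySem.Str.strip l == heading) = false) :
    insert_after_section_py (l :: rest) heading block =
      l :: insert_after_section_py rest heading block := by
  unfold insert_after_section_py
  rw [show findHeadingIndex (l :: rest) heading 0 = (findHeadingIndex rest heading 0).map (· + 1) by
    simp [findHeadingIndex, h, findHeadingIndex_shift]]
  cases hf : findHeadingIndex rest heading 0 with
  | none => simp
  | some idx =>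
      simp only [Option.map_some]
      have ha : advanceA (l :: rest) (idx + 1 + 1) = advanceA rest (idx + 1) + 1 := by
        rw [advanceA_eq_drop, advanceA_eq_drop]
        have h2 : (l :: rest).drop (idx + 1 + 1) = rest.drop (idx + 1) := rfl
        rw [h2]; omega
      simp only [ha]
      have ht : (l :: rest).take (advanceA rest (idx + 1) + 1) =
          l :: rest.take (advanceA rest (idx + 1)) := by
        rw [List.take_succ_cons]
      have hd : (l :: rest).drop (advanceA rest (idx + 1) + 1) =
          rest.drop (advanceA rest (idx + 1)) := rfl
      rw [ht, hd]; simp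

-- B, phase 3: found and inserted — everything just appended
theorem fold3 (heading : String) (block : List String) (rest : List String) (out : List String) :
    rest.foldl (stepB heading block) (true, true, out) = (true, true, out ++ rest) := by
  induction rest generalizing out with
  | nil => simp
  | cons l rs ih =>
      simp only [List.foldl_cons, stepB]
      simpa using ih (out ++ [l])

def finalizeB (block : List String) (s : Bool × Bool × List String) : List String :=
  if !s.2.1 then s.2.2 ++ [""] ++ block else s.2.2

-- B, phase 2: found, not yet inserted
theorem fold2 (heading : String) (block : List String) (rest : List String) (acc : List String) :
    finalizeB block (rest.foldl (stepB heading block) (true, false, acc)) =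
      acc ++ (rest.takeWhile notBdry ++ [""] ++ block ++ rest.dropWhile notBdry) := by
  induction rest generalizing acc with
  | nil => simp [finalizeB]
  | cons l rs ih =>
      by_cases h : PySem.Str.startswith l "# " = true
      · have hc : PySem.Chars.startswith l.toList ['#', ' '] = true := by
          simpa [hashToList] using h
        have hs : stepB heading block (true, false, acc) l =
            (true, true, acc ++ [""] ++ block ++ [l]) := by
          simp [stepB, hashToList, hc]
        rw [List.foldl_cons, hs, fold3,
            List.takeWhile_cons_of_neg (by simp [notBdry, hashToList, hc]),
            List.dropWhile_cons_of_neg (by simp [notBdry, hashToList, hc])]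
        simp [finalizeB]
      · have hc : PySem.Chars.startswith l.toList ['#', ' '] = false := by
          simpa [hashToList] using h
        have hs : stepB heading block (true, false, acc) l = (true, false, acc ++ [l]) := by
          simp [stepB, hashToList, hc]
        rw [List.foldl_cons, hs, ih (acc ++ [l]),
            List.takeWhile_cons_of_pos (by simp [notBdry, hashToList, hc]),
            List.dropWhile_cons_of_pos (by simp [notBdry, hashToList, hc])]
        simp

-- B, phase 1, tied directly to A's structural characterisation
theorem fold1 (heading : String) (block : List String) (lines : List String) (acc : List String) :
    finalizeB block (lines.foldl (stepB heading block) (false, false, acc)) =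
      acc ++ insert_after_section_py lines heading block := by
  induction lines generalizing acc with
  | nil => simp [finalizeB, insert_after_section_py, findHeadingIndex]
  | cons l rs ih =>
      by_cases h : (PySem.Str.strip l == heading) = true
      · have hs : stepB heading block (false, false, acc) l = (true, false, acc ++ [l]) := by
          simp [stepB, h]
        rw [List.foldl_cons, hs, fold2, A_found l rs heading block h]
        simp
      · have hs : stepB heading block (false, false, acc) l = (false, false, acc ++ [l]) := by
          simp [stepB, h]
        rw [List.foldl_cons, hs, ih (acc ++ [l]),
            A_notfound l rs heading block (by simpa using h)]
        simp

-- ===== VERDICT (by name: the statement is the Claim_ definition above) =====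
theorem insert_after_section_py_spec : Claim_equal_insert_after_section_py := by
  intro lines heading block _
  unfold Spec_insert_after_section_py insert_after_section_py_alt
  exact (fold1 heading block lines []).symm
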